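-- pv_equiv track=rewrite | github.com/Vilcius/constraint_gadgets | core/resource_estimation.py | _cnt_dicke_scs
-- ===== SOURCE A (Python) =====
-- from typing import Dict, List, Tuple
--
-- def _cnt_scs_nk(k_: int) -> Dict[str, int]:
--     """Gates for _gate_scs_nk(*, k_): 2k CNOT, 1 CRY, (k-1) doubly-ctrl RY."""
--     return {"CNOT": 2 * k_, "CRY": 1, "CC_RY": max(0, k_ - 1)}
--
-- def _cnt_dicke_scs(n: int, k: int) -> Dict[str, int]:
--     """Gates for _dicke_state_scs(n, k) (excludes _reverse SWAPs)."""
--     if k == 0: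
--         return {"CNOT": 0, "CRY": 0, "CC_RY": 0}
--     cnot = cry = cc_ry = 0
--     for _ in range(k + 1, n + 1):   # first block: (n-k) calls with weight k
--         g = _cnt_scs_nk(k)
--         cnot += g["CNOT"]; cry += g["CRY"]; cc_ry += g["CC_RY"]
--     for l in range(2, k + 1):        # second block: (k-1) calls with weight l-1
--         g = _cnt_scs_nk(l - 1)
--         cnot += g["CNOT"]; cry += g["CRY"]; cc_ry += g["CC_RY"]
--     return {"CNOT": cnot, "CRY": cry, "CC_RY": cc_ry}
-- ===== SOURCE B (Python) =====
-- def _cnt_dicke_scs(n: int, k: int):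
--     """Gates for _dicke_state_scs(n, k) (excludes _reverse SWAPs) — closed-form arithmetic."""
--     if k == 0:
--         return {"CNOT": 0, "CRY": 0, "CC_RY": 0}
--     m = max(0, n - k)        # number of weight-k calls in the first block
--     t = max(0, k - 1)        # number of calls in the second block
--     return {
--         "CNOT": 2 * k * m + t * (t + 1),
--         "CRY": m + t,
--         "CC_RY": t * m + t * (t - 1) // 2,
--     }
-- ===== Notes on version B (the rewrite author's own statement) =====
-- stated objective: faster
-- what changed: Both loops are replaced by closed-form arithmetic-series formulas (counts and triangular sums), eliminating all iteration.
import Mathlib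
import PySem

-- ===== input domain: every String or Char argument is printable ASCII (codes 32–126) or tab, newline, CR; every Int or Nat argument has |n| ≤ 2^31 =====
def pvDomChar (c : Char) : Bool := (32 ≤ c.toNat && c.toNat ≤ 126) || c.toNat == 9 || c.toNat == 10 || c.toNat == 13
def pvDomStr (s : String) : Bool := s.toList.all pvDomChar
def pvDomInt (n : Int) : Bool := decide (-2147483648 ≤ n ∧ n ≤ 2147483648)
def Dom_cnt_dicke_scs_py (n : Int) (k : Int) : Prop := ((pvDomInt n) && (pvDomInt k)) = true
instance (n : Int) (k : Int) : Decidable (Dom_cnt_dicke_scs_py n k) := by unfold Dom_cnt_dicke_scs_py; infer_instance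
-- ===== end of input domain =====

-- B replaces both gate-count loops by closed-form arithmetic-series formulas (O(1) instead of O(n+k)).


-- ===== PORT A =====
-- helper _cnt_scs_nk: {"CNOT": 2*k_, "CRY": 1, "CC_RY": max(0, k_-1)}
def cnt_scs_nk (k_ : Int) : PySem.Dict String Int :=
  PySem.Dict.mk [("CNOT", 2 * k_), ("CRY", 1), ("CC_RY", max 0 (k_ - 1))]

def cnt_dicke_scs_py (n : Int) (k : Int) : List (String × Int) :=
  if k = 0 then [("CNOT", 0), ("CRY", 0), ("CC_RY", 0)]
  else
    -- cnot, cry, cc_ry accumulated over the two loops (keys are always present, so g[key] = getD key 0)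
    let s1 : Int × Int × Int :=
      (PySem.List.pyRange (k + 1) (n + 1) 1).foldl
        (fun acc _ =>
          let g := cnt_scs_nk k
          (acc.1 + PySem.Dict.getD g "CNOT" 0, acc.2.1 + PySem.Dict.getD g "CRY" 0,
           acc.2.2 + PySem.Dict.getD g "CC_RY" 0)) (0, 0, 0)
    let s2 : Int × Int × Int :=
      (PySem.List.pyRange 2 (k + 1) 1).foldl
        (fun acc l =>
          let g := cnt_scs_nk (l - 1)
          (acc.1 + PySem.Dict.getD g "CNOT" 0, acc.2.1 + PySem.Dict.getD g "CRY" 0,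
           acc.2.2 + PySem.Dict.getD g "CC_RY" 0)) s1
    [("CNOT", s2.1), ("CRY", s2.2.1), ("CC_RY", s2.2.2)]

-- ===== PORT B =====
def cnt_dicke_scs_py_alt (n : Int) (k : Int) : List (String × Int) :=
  if k = 0 then [("CNOT", 0), ("CRY", 0), ("CC_RY", 0)]
  else
    let m := max 0 (n - k)
    let t := max 0 (k - 1)
    [("CNOT", 2 * k * m + t * (t + 1)), ("CRY", m + t),
     ("CC_RY", t * m + PySem.Int.floordiv (t * (t - 1)) 2)]

-- ===== PRECONDITION & SPEC =====
def Spec_cnt_dicke_scs_py (n : Int) (k : Int) (out : List (String × Int)) : Prop := out = cnt_dicke_scs_py_alt n k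
instance (n : Int) (k : Int) (out : List (String × Int)) : Decidable (Spec_cnt_dicke_scs_py n k out) := by unfold Spec_cnt_dicke_scs_py; infer_instance

-- ===== CLAIM (what is proved, stated in full; the proofs are below) =====
def Claim_equal_cnt_dicke_scs_py : Prop := ∀ (n : Int) (k : Int), Dom_cnt_dicke_scs_py n k → Spec_cnt_dicke_scs_py n k (cnt_dicke_scs_py n k)

-- ===== LEMMAS AND PROOFS =====

-- the first loop's body is constant; fold over any list adds length-many copies
theorem foldl_const_add (c1 c2 c3 : Int) (xs : List Int) (init : Int × Int × Int) :
    xs.foldl (fun (acc : Int × Int × Int) _ => (acc.1 + c1, acc.2.1 + c2, acc.2.2 + c3)) init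
      = (init.1 + xs.length * c1, init.2.1 + xs.length * c2, init.2.2 + xs.length * c3) := by
  induction xs generalizing init with
  | nil => simp
  | cons x xs ih =>
    simp only [List.foldl_cons, ih, List.length_cons]
    refine Prod.ext ?_ (Prod.ext ?_ ?_) <;> simp <;> ring

-- the second loop over range(2, t+2) sums the arithmetic series
theorem foldl_second (t : Nat) (init : Int × Int × Int) :
    (PySem.List.pyRange 2 ((t : Int) + 2) 1).foldl
        (fun (acc : Int × Int × Int) l => (acc.1 + 2 * (l - 1), acc.2.1 + 1, acc.2.2 + max 0 (l - 1 - 1))) init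
      = (init.1 + t * (t + 1), init.2.1 + t, init.2.2 + t * (t - 1) / 2) := by
  induction t generalizing init with
  | zero =>
    rw [PySem.List.pyRange_one_eq_nil (by omega)]
    simp
  | succ t ih =>
    rw [show ((t + 1 : Nat) : Int) + 2 = ((t : Int) + 2) + 1 by push_cast; ring,
        PySem.List.pyRange_one_succ_right (by omega), List.foldl_append, ih]
    simp only [List.foldl_cons, List.foldl_nil, Prod.mk.injEq]
    have h2 : max (0 : Int) ((t : Int) + 2 - 1 - 1) = (t : Int) := by omega
    refine ⟨?_, ?_, ?_⟩
    · push_cast; ring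
    · push_cast; ring
    · rw [h2]
      push_cast
      have h3 : ((t : Int) + 1) * ((t : Int) + 1 - 1) = (t : Int) * ((t : Int) - 1) + 2 * t := by ring
      rw [h3, show (t : Int) * ((t : Int) - 1) + 2 * (t : Int)
            = (t : Int) * ((t : Int) - 1) + (t : Int) * 2 by ring,
          Int.add_mul_ediv_right _ _ (by norm_num : (2:Int) ≠ 0)]
      ring

theorem cnt_dicke_scs_py_eq (n k : Int) : cnt_dicke_scs_py n k = cnt_dicke_scs_py_alt n k := by
  unfold cnt_dicke_scs_py cnt_dicke_scs_py_alt
  by_cases hk : k = 0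
  · simp [hk]
  · simp only [if_neg hk, cnt_scs_nk, PySem.Dict.getD, PySem.Dict.get?_mk_cons,
      String.reduceBEq, beq_self_eq_true, if_true, if_false, Bool.false_eq_true, Option.getD_some]
    rw [foldl_const_add (2 * k) 1 (max 0 (k - 1)) (PySem.List.pyRange (k + 1) (n + 1) 1) (0, 0, 0),
        PySem.List.length_pyRange_one]
    have hm : (((n + 1 - (k + 1)).toNat : Nat) : Int) = max 0 (n - k) := by omega
    rw [hm]
    rcases Int.lt_or_le k 0 with hneg | hpos
    · -- k < 0: the second loop is empty and max 0 (k-1) = 0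
      rw [PySem.List.pyRange_one_eq_nil (by omega : (k : Int) + 1 ≤ 2)]
      simp only [List.foldl_nil, List.cons.injEq, Prod.mk.injEq, and_true, true_and]
      have ht : max (0 : Int) (k - 1) = 0 := by omega
      rw [ht, PySem.Int.floordiv_eq_ediv_of_pos (by norm_num : (0:Int) < 2)]
      refine ⟨by ring, by ring, by norm_num⟩
    · -- k ≥ 1: apply the arithmetic-series lemma with k = t + 1
      obtain ⟨t, rfl⟩ : ∃ t : ℕ, k = (t : Int) + 1 := ⟨(k - 1).toNat, by omega⟩
      rw [show ((t : Int) + 1) + 1 = (t : Int) + 2 by ring, foldl_second]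
      have ht : max (0 : Int) ((t : Int) + 1 - 1) = (t : Int) := by omega
      rw [ht, PySem.Int.floordiv_eq_ediv_of_pos (by norm_num : (0:Int) < 2)]
      simp only [List.cons.injEq, Prod.mk.injEq, and_true, true_and]
      refine ⟨by ring, by ring, by ring⟩

-- ===== VERDICT (by name: the statement is the Claim_ definition above) =====
theorem cnt_dicke_scs_py_spec : Claim_equal_cnt_dicke_scs_py := by
  intro n k _
  unfold Spec_cnt_dicke_scs_py
  exact cnt_dicke_scs_py_eq n k
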